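-- pv_equiv track=rewrite | github.com/MMS720/python-project | EX_3.py | ex3_3
-- ===== SOURCE A (Python) =====
-- def ex3_3(x):
--     xc = 0
--     yc = 0
--     "n" == 1
--     "e" == 1
--     "w" == -1
--     "s" == -1
--     for i in range(len(x) - 1):
--         if x[i] == 'n':
--             yc += 1
--         elif x[i] == 'e':
--             xc += 1
--         elif x[i] == 'w':
--             xc += -1
--         elif x[i] == 's':
--             yc += -1
--     if xc == 3 and yc == 2:
--         return (True)
--     elif xc == -4 and yc == 3:
--         return (True)
--     else:
--         return (False)
-- ===== SOURCE B (Python) =====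
-- def ex3_3(x):
--     MOVES = {'n': (0, 1), 's': (0, -1), 'e': (1, 0), 'w': (-1, 0)}
--
--     def disp(lo, hi):
--         if hi - lo <= 0:
--             return (0, 0)
--         if hi - lo == 1:
--             return MOVES.get(x[lo], (0, 0))
--         mid = (lo + hi) // 2
--         ax, ay = disp(lo, mid)
--         bx, by = disp(mid, hi)
--         return (ax + bx, ay + by)
--
--     return disp(0, len(x) - 1) in {(3, 2), (-4, 3)}
-- ===== Notes on version B (the rewrite author's own statement) =====
-- stated objective: alternative
-- what changed: Replaces A's left-to-right index loop accumulating a displacement pair (and its dead comparison statements) with a divide-and-conquer recursion: the displacement of x[0:len(x)-1] is computed by splitting the interval in half, summing the two halves' displacement vectors (per-character vectors come from a direction->vector table), and testing membership of the result in the target set {(3,2),(-4,3)}.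
import Mathlib
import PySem

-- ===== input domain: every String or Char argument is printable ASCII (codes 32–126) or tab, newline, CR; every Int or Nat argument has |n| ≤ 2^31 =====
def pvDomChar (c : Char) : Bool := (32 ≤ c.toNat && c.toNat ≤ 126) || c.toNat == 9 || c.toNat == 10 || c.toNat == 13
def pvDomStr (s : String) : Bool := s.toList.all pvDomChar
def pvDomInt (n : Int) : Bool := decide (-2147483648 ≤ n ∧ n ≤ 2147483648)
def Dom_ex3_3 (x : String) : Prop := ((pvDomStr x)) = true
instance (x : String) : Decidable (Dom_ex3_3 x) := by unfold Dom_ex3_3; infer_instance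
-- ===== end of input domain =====

-- B replaces A's accumulating index loop (and its dead comparison statements) with a
-- divide-and-conquer displacement sum over a direction->vector table; objective: alternative.

-- ===== PORT A =====
def ex3_3 (x : String) : Bool :=
  let p := (PySem.List.pyRange 0 (PySem.Str.len x - 1) 1).foldl
    (fun (p : Int × Int) (i : Int) =>
      match PySem.Str.pyGet? x i with
      | none => p  -- unreachable: i is in range; totalization only
      | some c =>
        if c = 'n' then (p.1, p.2 + 1)
        else if c = 'e' then (p.1 + 1, p.2)
        else if c = 'w' then (p.1 + (-1), p.2)
        else if c = 's' then (p.1, p.2 + (-1))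
        else p) (0, 0)
  if p.1 = 3 ∧ p.2 = 2 then true
  else if p.1 = -4 ∧ p.2 = 3 then true
  else false

-- ===== PORT B =====
-- the MOVES dict literal
def pvMoves : PySem.Dict Char (Int × Int) :=
  PySem.Dict.ofList [('n', (0, 1)), ('s', (0, -1)), ('e', (1, 0)), ('w', (-1, 0))]

-- the inner recursive disp(lo, hi)
def pvDisp (x : String) (lo hi : Int) : Int × Int :=
  if hi - lo ≤ 0 then (0, 0)
  else if hi - lo = 1 then
    match PySem.Str.pyGet? x lo with
    | some c => PySem.Dict.getD pvMoves c (0, 0)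
    | none => (0, 0)  -- unreachable at B's call sites (0 ≤ lo < len); totalization only
  else
    let mid := PySem.Int.floordiv (lo + hi) 2
    let a := pvDisp x lo mid
    let b := pvDisp x mid hi
    (a.1 + b.1, a.2 + b.2)
termination_by (hi - lo).toNat
decreasing_by
  all_goals
    simp only [PySem.Int.floordiv_eq_ediv_of_pos (by omega : (0:Int) < 2)] at *
    omega

def ex3_3_alt (x : String) : Bool :=
  [((3 : Int), (2 : Int)), (-4, 3)].contains (pvDisp x 0 (PySem.Str.len x - 1))

-- ===== PRECONDITION & SPEC =====
def Spec_ex3_3 (x : String) (out : Bool) : Prop := out = ex3_3_alt x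
instance (x : String) (out : Bool) : Decidable (Spec_ex3_3 x out) := by unfold Spec_ex3_3; infer_instance

-- ===== CLAIM (what is proved, stated in full; the proofs are below) =====
def Claim_equal_ex3_3 : Prop := ∀ (x : String), Dom_ex3_3 x → Spec_ex3_3 x (ex3_3 x)

-- ===== LEMMAS AND PROOFS =====

-- per-character displacement vector (the mathematical reading of both programs' tables)
def pvVec (c : Char) : Int × Int :=
  if c = 'n' then (0, 1)
  else if c = 's' then (0, -1)
  else if c = 'e' then (1, 0)
  else if c = 'w' then (-1, 0)
  else (0, 0)

lemma getD_moves (c : Char) : PySem.Dict.getD pvMoves c (0, 0) = pvVec c := by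
  by_cases h1 : c = 'n'
  · subst h1; decide
  by_cases h2 : c = 's'
  · subst h2; decide
  by_cases h3 : c = 'e'
  · subst h3; decide
  by_cases h4 : c = 'w'
  · subst h4; decide
  have e1 : ('n' == c) = false := beq_eq_false_iff_ne.mpr (Ne.symm h1)
  have e2 : ('s' == c) = false := beq_eq_false_iff_ne.mpr (Ne.symm h2)
  have e3 : ('e' == c) = false := beq_eq_false_iff_ne.mpr (Ne.symm h3)
  have e4 : ('w' == c) = false := beq_eq_false_iff_ne.mpr (Ne.symm h4)
  simp only [pvMoves, pvVec, PySem.Dict.getD, PySem.Dict.get?, PySem.Dict.ofList,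
    PySem.Dict.update, PySem.Dict.insert, PySem.Dict.empty]
  simp [List.find?, e1, e2, e3, e4, h1, h2, h3, h4]

-- A's loop step, named for the proofs.
def pvStep (p : Int × Int) (c : Char) : Int × Int :=
  if c = 'n' then (p.1, p.2 + 1)
  else if c = 'e' then (p.1 + 1, p.2)
  else if c = 'w' then (p.1 + (-1), p.2)
  else if c = 's' then (p.1, p.2 + (-1))
  else p

lemma pvStep_eq_add (p : Int × Int) (c : Char) : pvStep p c = p + pvVec c := by
  by_cases h1 : c = 'n' <;> by_cases h2 : c = 's' <;> by_cases h3 : c = 'e' <;>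
    by_cases h4 : c = 'w' <;>
  simp_all [pvStep, pvVec, Prod.ext_iff]

-- A's fold accumulates the sum of the per-character vectors
lemma fold_step_sum (l : List Char) :
    ∀ p : Int × Int, l.foldl pvStep p = p + (l.map pvVec).sum := by
  induction l with
  | nil => intro p; simp
  | cons h t ih =>
    intro p
    rw [List.foldl_cons, pvStep_eq_add, ih]
    simp [add_assoc]

-- A's index loop over range(m) is the fold over the first m characters
lemma fold_range_take (l : List Char) :
    ∀ (m : Nat), m ≤ l.length →
      (PySem.List.pyRange 0 (m : Int) 1).foldl
        (fun (p : Int × Int) (i : Int) =>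
          match PySem.List.pyGet? l i with
          | none => p
          | some c => pvStep p c) (0, 0)
      = (l.take m).foldl pvStep (0, 0) := by
  intro m
  induction m with
  | zero => intro _; simp
  | succ k ih =>
    intro hle
    have hk : k < l.length := by omega
    rw [show ((k + 1 : Nat) : Int) = (k : Int) + 1 by push_cast; ring,
        PySem.List.pyRange_one_succ_right (by exact_mod_cast Nat.zero_le k),
        List.foldl_append, ih (by omega)]
    have hget : PySem.List.pyGet? l (k : Int) = some l[k] := by
      rw [PySem.List.pyGet?_natCast, List.getElem?_eq_getElem hk]
    simp only [List.foldl_cons, List.foldl_nil, hget]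
    rw [List.take_add_one, List.getElem?_eq_getElem hk]
    rw [List.foldl_append]
    simp

-- B's divide-and-conquer computes the vector sum of the segment [lo, hi)
lemma pvDisp_eq_sum (x : String) :
    ∀ (n : Nat) (lo hi : Int), (hi - lo).toNat = n → 0 ≤ lo → hi ≤ x.toList.length →
      pvDisp x lo hi
        = (((x.toList.drop lo.toNat).take (hi - lo).toNat).map pvVec).sum := by
  intro n
  induction n using Nat.strong_induction_on with
  | _ n ih =>
    intro lo hi hn hlo hhi
    rw [pvDisp]
    by_cases h0 : hi - lo ≤ 0
    · simp [h0, show (hi - lo).toNat = 0 by omega]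
    · by_cases h1 : hi - lo = 1
      · have hlt : lo.toNat < x.toList.length := by omega
        have hget : PySem.Str.pyGet? x lo = some x.toList[lo.toNat] := by
          conv_lhs => rw [show lo = (lo.toNat : Int) by omega]
          rw [PySem.Str.pyGet?_natCast, List.getElem?_eq_getElem hlt]
        simp only [h1, if_true, hget, if_neg (by omega : ¬ (1:Int) ≤ 0)]
        rw [getD_moves]
        rw [show (Int.toNat 1) = 1 from rfl, List.take_one, List.head?_drop,
            List.getElem?_eq_getElem hlt]
        simp
      · simp only [h0, h1, if_false]
        have h2 : 2 ≤ hi - lo := by omega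
        set mid := PySem.Int.floordiv (lo + hi) 2 with hmid
        have hmid' : mid = (lo + hi) / 2 := by
          rw [hmid, PySem.Int.floordiv_eq_ediv_of_pos (by omega)]
        have hb1 : lo + 1 ≤ mid := by omega
        have hb2 : mid + 1 ≤ hi := by omega
        rw [ih (mid - lo).toNat (by omega) lo mid rfl hlo (by omega),
            ih (hi - mid).toNat (by omega) mid hi rfl (by omega) hhi]
        have hsplit : (hi - lo).toNat = (mid - lo).toNat + (hi - mid).toNat := by omega
        rw [hsplit, List.take_add, List.map_append, List.sum_append]
        rw [List.drop_drop]
        rw [show lo.toNat + (mid - lo).toNat = mid.toNat by omega]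
        simp [Prod.ext_iff]

-- ===== VERDICT (by name: the statement is the Claim_ definition above) =====
theorem ex3_3_spec : Claim_equal_ex3_3 := by
  intro x _
  unfold Spec_ex3_3 ex3_3 ex3_3_alt
  have hfold :
      (PySem.List.pyRange 0 (PySem.Str.len x - 1) 1).foldl
        (fun (p : Int × Int) (i : Int) =>
          match PySem.Str.pyGet? x i with
          | none => p
          | some c => pvStep p c) (0, 0)
      = ((x.toList.take (x.toList.length - 1)).map pvVec).sum := by
    have hrange : PySem.List.pyRange 0 (PySem.Str.len x - 1) 1
        = PySem.List.pyRange 0 ((x.toList.length - 1 : Nat) : Int) 1 := by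
      rcases Nat.eq_zero_or_pos x.toList.length with h0 | hpos
      · rw [PySem.Str.len_eq, h0]
        rw [PySem.List.pyRange_one_eq_nil (by omega),
            PySem.List.pyRange_one_eq_nil (by simp)]
      · rw [PySem.Str.len_eq,
            show ((x.toList.length : Int) - 1) = ((x.toList.length - 1 : Nat) : Int) by omega]
    have hb : ∀ (i : Int), PySem.Str.pyGet? x i = PySem.List.pyGet? x.toList i := by
      intro i; simp
    rw [hrange]
    simp only [hb]
    rw [fold_range_take x.toList (x.toList.length - 1) (by omega), fold_step_sum]
    simp
  have hdisp : pvDisp x 0 (PySem.Str.len x - 1)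
      = ((x.toList.take (x.toList.length - 1)).map pvVec).sum := by
    rw [PySem.Str.len_eq,
        pvDisp_eq_sum x ((x.toList.length : Int) - 1 - 0).toNat 0 ((x.toList.length : Int) - 1)
          rfl le_rfl (by omega)]
    simp
  simp only [pvStep] at hfold
  rw [hfold, hdisp]
  obtain ⟨a, b⟩ := ((x.toList.take (x.toList.length - 1)).map pvVec).sum
  simp only [List.contains_eq_mem, List.mem_cons, List.not_mem_nil, or_false,
    Prod.mk.injEq]
  split_ifs with h1 h2 <;> simp_all [Prod.ext_iff]
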